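-- pv_equiv track=rewrite | github.com/Ranjana-Kambhammettu/password-generator-and-analyser | Feature creation.py | w9
-- ===== SOURCE A (Python) =====
-- def w9(s):
--     d,c={},0
--     for char in s:
--         if char not in d:
--             d[char]=1
--         else:
--             d[char]+=1
--     for char in d:
--         if d[char]>1:
--             c+=1
--     return -(c*(c-1))
-- ===== SOURCE B (Python) =====
-- def w9(s):
--     c = _dup_runs(sorted(s))
--     return -(c * (c - 1))
--
--
-- def _dup_runs(t):
--     # t is sorted, so equal characters form consecutive runs
--     if not t:
--         return 0
--     run = 1
--     while run < len(t) and t[run] == t[0]: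
--         run += 1
--     return (1 if run > 1 else 0) + _dup_runs(t[run:])
-- ===== Notes on version B (the rewrite author's own statement) =====
-- stated objective: alternative
-- what changed: Replaces A's two-pass hash-table frequency count (build dict, then scan it) with sort-then-scan: sort the characters and count consecutive runs of length > 1 by recursion over the run structure.
import Mathlib
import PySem

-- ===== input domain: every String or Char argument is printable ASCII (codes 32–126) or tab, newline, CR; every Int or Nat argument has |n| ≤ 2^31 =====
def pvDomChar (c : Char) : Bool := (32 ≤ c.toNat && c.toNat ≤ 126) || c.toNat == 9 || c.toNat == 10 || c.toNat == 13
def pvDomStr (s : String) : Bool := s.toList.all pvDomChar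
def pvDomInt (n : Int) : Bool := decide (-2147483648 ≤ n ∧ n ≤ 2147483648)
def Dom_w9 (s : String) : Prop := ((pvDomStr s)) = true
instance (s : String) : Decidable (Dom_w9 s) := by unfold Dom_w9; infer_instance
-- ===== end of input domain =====

-- B replaces A's dict frequency table with sort-then-scan over runs of equal characters (alternative algorithm, not claimed faster).

-- ===== PORT A =====
def w9 (s : String) : Int :=
  let d := s.toList.foldl (fun d ch => if !(d.contains ch) then d.insert ch (1 : Int) else d.insert ch (d.getD ch 0 + 1)) PySem.Dict.empty
  let c := d.keys.foldl (fun c k => if d.getD k 0 > 1 then c + 1 else c) (0 : Int);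
  -(c * (c - 1))

-- ===== PORT B =====
-- _dup_runs: 'run' = 1 + length of the inner while's scan (a takeWhile); t[run:] is drop run
def w9Runs : List Char → Int
  | [] => 0
  | x :: xs =>
    let run := 1 + (xs.takeWhile (fun y => y == x)).length;
    (if run > 1 then (1 : Int) else 0) + w9Runs ((x :: xs).drop run)
termination_by l => l.length
decreasing_by
  simp only [List.length_drop, List.length_cons]
  have := (List.takeWhile_sublist (fun y => y == x) (l := xs)).length_le
  omega

def w9_alt (s : String) : Int :=
  let c := w9Runs (PySem.List.sorted s.toList (fun x => x) false);
  -(c * (c - 1))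

-- ===== PRECONDITION & SPEC =====
def Spec_w9 (s : String) (out : Int) : Prop := out = w9_alt s
instance (s : String) (out : Int) : Decidable (Spec_w9 s out) := by unfold Spec_w9; infer_instance

-- ===== CLAIM (what is proved, stated in full; the proofs are below) =====
def Claim_equal_w9 : Prop := ∀ (s : String), Dom_w9 s → Spec_w9 s (w9 s)

-- ===== LEMMAS AND PROOFS =====

-- common value: number of distinct characters occurring more than once
def dupCount (l : List Char) : Int :=
  ((l.toFinset.filter (fun x => 1 < l.count x)).card : Int)

theorem w9Runs_nil : w9Runs [] = 0 := by
  rw [w9Runs.eq_def]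

theorem w9Runs_cons (x : Char) (xs : List Char) :
    w9Runs (x :: xs)
      = (if 1 + (xs.takeWhile (fun y => y == x)).length > 1 then (1 : Int) else 0)
        + w9Runs ((x :: xs).drop (1 + (xs.takeWhile (fun y => y == x)).length)) := by
  rw [w9Runs.eq_def]

theorem foldl_if_count (p : Char → Bool) :
    ∀ (ks : List Char) (c0 : Int),
      ks.foldl (fun c k => if p k = true then c + 1 else c) c0
        = c0 + (ks.countP p : Int) := by
  intro ks
  induction ks with
  | nil => intro c0; simp
  | cons k ks ih =>
    intro c0
    simp only [List.foldl_cons, List.countP_cons]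
    by_cases h : p k = true
    · simp [h, ih]; ring
    · simp [h, ih]

theorem countP_nodup_card (ks : List Char) (hnd : ks.Nodup) (p : Char → Bool) :
    ks.countP p = (ks.toFinset.filter (fun z => p z = true)).card := by
  rw [← List.toFinset_filter, List.toFinset_card_of_nodup (hnd.filter p),
      List.countP_eq_length_filter]

theorem w9_eq_dupCount (s : String) : w9 s = -(dupCount s.toList * (dupCount s.toList - 1)) := by
  simp only [w9]
  have hstep : (fun (d : PySem.Dict Char Int) ch =>
      if !(d.contains ch) then d.insert ch (1 : Int)
      else d.insert ch (d.getD ch 0 + 1))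
      = (fun d ch => d.insert ch (d.getD ch 0 + 1)) := by
    funext d ch
    by_cases h : d.contains ch = true
    · simp [h]
    · simp only [Bool.not_eq_true] at h
      rw [PySem.Dict.getD_of_not_contains d (0 : Int) h]
      simp [h]
  rw [hstep, PySem.Dict.foldl_insert_getD_add_one_eq_counter]
  have hc : (PySem.Dict.counter s.toList).keys.foldl
      (fun c k => if (PySem.Dict.counter s.toList).getD k 0 > 1 then c + 1 else c) (0 : Int)
      = dupCount s.toList := by
    have h1 : (fun (c : Int) (k : Char) =>
        if (PySem.Dict.counter s.toList).getD k 0 > 1 then c + 1 else c)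
        = (fun c k => if (decide (1 < s.toList.count k)) = true then c + 1 else c) := by
      funext c k
      rw [PySem.Dict.getD_counter]
      simp
    rw [h1, foldl_if_count, PySem.Dict.keys_counter,
        countP_nodup_card _ (PySem.Set.nodup_ofList _)]
    unfold dupCount
    have hfin : (PySem.Set.ofList s.toList).toFinset = s.toList.toFinset := by
      ext z; simp [PySem.Set.mem_ofList]
    rw [hfin]
    norm_num
  rw [hc]

theorem w9Runs_eq_dupCount :
    ∀ (n : ℕ) (l : List Char), l.length ≤ n → l.Pairwise (· ≤ ·) →
      w9Runs l = dupCount l := by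
  intro n
  induction n with
  | zero =>
    intro l hl _
    have : l = [] := List.length_eq_zero_iff.mp (Nat.le_zero.mp hl)
    subst this
    simp [w9Runs_nil, dupCount]
  | succ n ih =>
    intro l hl hp
    match l with
    | [] => simp [w9Runs_nil, dupCount]
    | x :: xs =>
      set t := xs.takeWhile (fun y => y == x) with ht
      set r := xs.dropWhile (fun y => y == x) with hr
      have hxs : t ++ r = xs := List.takeWhile_append_dropWhile
      have htx : ∀ y ∈ t, y = x := by
        intro y hy
        rw [ht] at hy
        simpa using List.mem_takeWhile_imp hy
      have hxsp : xs.Pairwise (· ≤ ·) := hp.of_cons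
      have hxle : ∀ y ∈ xs, x ≤ y := (List.pairwise_cons.mp hp).1
      have hrsub : r.Sublist xs := List.dropWhile_sublist _
      have hrp : r.Pairwise (· ≤ ·) := hxsp.sublist hrsub
      have hxr : x ∉ r := by
        intro hmem
        have hrne : r ≠ [] := by intro h; rw [h] at hmem; simp at hmem
        obtain ⟨b, bs, hcons⟩ := List.exists_cons_of_ne_nil hrne
        have hdw : xs.dropWhile (fun y => y == x) = b :: bs := hr.symm.trans hcons
        have hhead : (b == x) = false := by
          have h0 := List.head_dropWhile_not (fun y => y == x) (l := xs)
            (by rw [hdw]; simp)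
          simpa [hdw] using h0
        have hbx : b ≠ x := by simpa using hhead
        have hbxs : b ∈ xs := hrsub.subset (by rw [hcons]; simp)
        have hxleb : x ≤ b := hxle _ hbxs
        rw [hcons] at hmem hrp
        rcases List.mem_cons.mp hmem with h | h
        · exact hbx h.symm
        · exact hbx (le_antisymm ((List.pairwise_cons.mp hrp).1 x h) hxleb)
      have hcx : (x :: xs).count x = 1 + t.length := by
        have hct : t.count x = t.length := List.count_eq_length.mpr (fun y hy => (htx y hy).symm)
        have hcr : r.count x = 0 := List.count_eq_zero.mpr hxr
        rw [List.count_cons_self, ← hxs, List.count_append, hct, hcr]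
        omega
      have hcz : ∀ z, z ≠ x → (x :: xs).count z = r.count z := by
        intro z hz
        have hct : t.count z = 0 := List.count_eq_zero.mpr (fun hmem => hz (htx z hmem))
        have h1 : (x :: xs).count z = xs.count z := by
          simp [Ne.symm hz]
        rw [h1, ← hxs, List.count_append, hct]
        omega
      have hdrop : (x :: xs).drop (1 + t.length) = r := by
        have h1 : (x :: xs).drop (1 + t.length) = xs.drop t.length := by
          rw [Nat.add_comm 1 t.length, List.drop_succ_cons]
        rw [h1, ← hxs, List.drop_left]
      have hrlen : r.length ≤ n := by
        have h2 := congrArg List.length hxs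
        simp only [List.length_append] at h2
        simp only [List.length_cons] at hl
        omega
      have hih := ih r hrlen hrp
      have hL : w9Runs (x :: xs)
          = (if 1 + t.length > 1 then (1 : Int) else 0) + w9Runs r := by
        rw [w9Runs_cons, ← ht, hdrop]
      have hfin : (x :: xs).toFinset = insert x r.toFinset := by
        ext z
        simp only [List.mem_toFinset, Finset.mem_insert, List.mem_cons]
        constructor
        · rintro (h | h)
          · exact Or.inl h
          · rw [← hxs] at h
            rcases List.mem_append.mp h with h | h
            · exact Or.inl (htx z h)
            · exact Or.inr h
        · rintro (h | h)
          · exact Or.inl h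
          · exact Or.inr (by rw [← hxs]; exact List.mem_append_right _ h)
      have hxrf : x ∉ r.toFinset := by simpa using hxr
      have hfilter : r.toFinset.filter (fun z => 1 < (x :: xs).count z)
          = r.toFinset.filter (fun z => 1 < r.count z) := by
        apply Finset.filter_congr
        intro z hz
        have hzx : z ≠ x := by
          intro h; exact hxrf (h ▸ hz)
        rw [hcz z hzx]
      have hR : dupCount (x :: xs)
          = (if 1 + t.length > 1 then (1 : Int) else 0) + dupCount r := by
        unfold dupCount
        rw [hfin, Finset.filter_insert, hcx]
        by_cases hcase : 1 + t.length > 1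
        · rw [if_pos (by omega : 1 < 1 + t.length), if_pos hcase, hfilter,
            Finset.card_insert_of_notMem (fun hmem => hxrf (Finset.mem_of_mem_filter _ hmem))]
          push_cast; ring
        · rw [if_neg (by omega : ¬ 1 < 1 + t.length), if_neg hcase, hfilter]
          simp
      rw [hL, hR, hih]

theorem w9_alt_eq_dupCount (s : String) :
    w9_alt s = -(dupCount s.toList * (dupCount s.toList - 1)) := by
  unfold w9_alt
  have hperm : (PySem.List.sorted s.toList (fun x => x) false).Perm s.toList :=
    PySem.List.sorted_perm _ _ _
  have hp : (PySem.List.sorted s.toList (fun x => x) false).Pairwise (· ≤ ·) := by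
    simpa using PySem.List.sorted_pairwise s.toList (fun x => x)
  have h1 : w9Runs (PySem.List.sorted s.toList (fun x => x) false)
      = dupCount (PySem.List.sorted s.toList (fun x => x) false) :=
    w9Runs_eq_dupCount _ _ le_rfl hp
  have h2 : dupCount (PySem.List.sorted s.toList (fun x => x) false) = dupCount s.toList := by
    unfold dupCount
    have hfin : (PySem.List.sorted s.toList (fun x => x) false).toFinset = s.toList.toFinset := by
      ext z; simp [hperm.mem_iff]
    have hfil : s.toList.toFinset.filter
          (fun z => 1 < (PySem.List.sorted s.toList (fun x => x) false).count z)
        = s.toList.toFinset.filter (fun z => 1 < s.toList.count z) := by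
      apply Finset.filter_congr
      intro z _
      rw [hperm.count_eq]
    rw [hfin, hfil]
  rw [h1, h2]

-- ===== VERDICT (by name: the statement is the Claim_ definition above) =====
theorem w9_spec : Claim_equal_w9 := by
  intro s _
  unfold Spec_w9
  rw [w9_eq_dupCount, w9_alt_eq_dupCount]
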